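-- pv_equiv track=rewrite | github.com/eliottcassidy2000/math | 04-computation/h21_poisoning_graph.py | max_matching_3cycles
-- ===== SOURCE A (Python) =====
-- def max_matching_3cycles(cycle_sets):
--     nc = len(cycle_sets)
--     if nc == 0:
--         return 0
--     for a in range(nc):
--         for b in range(a+1, nc):
--             if cycle_sets[a] & cycle_sets[b]:
--                 continue
--             for c in range(b+1, nc):
--                 if (not (cycle_sets[c] & cycle_sets[a])) and \
--                    (not (cycle_sets[c] & cycle_sets[b])):
--                     return 3
--     for a in range(nc):
--         for b in range(a+1, nc):
--             if not (cycle_sets[a] & cycle_sets[b]):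
--                 return 2
--     return 1 if nc > 0 else 0
-- ===== SOURCE B (Python) =====
-- def max_matching_3cycles(cycle_sets):
--     n = len(cycle_sets)
--     if n == 0:
--         return 0
--     # Build the disjointness graph once (n^2 set intersections), then look for a
--     # triangle by intersecting neighbour index sets, instead of A's third nested scan.
--     nbr = [[j for j in range(n) if j != i and not (cycle_sets[i] & cycle_sets[j])]
--            for i in range(n)]
--     nbrset = [frozenset(x) for x in nbr]
--     for i in range(n):
--         for j in nbr[i]:
--             if i < j and nbrset[i] & nbrset[j]:
--                 return 3
--     if any(nbr[i] for i in range(n)):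
--         return 2
--     return 1
-- ===== Notes on version B (the rewrite author's own statement) =====
-- stated objective: alternative
-- what changed: B builds the pairwise-disjointness graph once (adjacency index lists plus frozensets) and detects a triangle by intersecting the neighbour sets of each disjoint pair, replacing A's third nested scan that re-intersects the raw element sets.
import Mathlib
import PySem

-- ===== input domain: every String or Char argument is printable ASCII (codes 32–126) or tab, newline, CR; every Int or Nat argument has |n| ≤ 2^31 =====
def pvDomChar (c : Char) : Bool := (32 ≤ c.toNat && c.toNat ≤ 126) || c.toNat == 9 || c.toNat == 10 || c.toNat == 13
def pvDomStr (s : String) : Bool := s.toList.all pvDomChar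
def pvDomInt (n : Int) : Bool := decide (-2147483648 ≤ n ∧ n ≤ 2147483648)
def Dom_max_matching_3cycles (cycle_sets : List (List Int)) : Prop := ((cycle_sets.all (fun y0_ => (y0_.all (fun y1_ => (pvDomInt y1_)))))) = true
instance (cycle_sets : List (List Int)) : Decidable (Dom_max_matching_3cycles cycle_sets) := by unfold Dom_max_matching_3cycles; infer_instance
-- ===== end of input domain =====

-- B builds the disjointness graph once and finds a triangle by intersecting neighbour
-- index sets, instead of A's third nested scan over the raw sets (objective: alternative).

-- bool(x & y) on Python sets: the two sets share an element
def pyInter (x y : List Int) : Bool := x.any (fun e => y.contains e)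

-- ===== PORT A =====
def max_matching_3cycles (cycle_sets : List (List Int)) : Int :=
  let nc := cycle_sets.length
  if nc = 0 then 0
  else if (List.range nc).any (fun a =>
      (List.range' (a+1) (nc-(a+1))).any (fun b =>
        !pyInter (cycle_sets.getD a []) (cycle_sets.getD b []) &&
        (List.range' (b+1) (nc-(b+1))).any (fun c =>
          !pyInter (cycle_sets.getD c []) (cycle_sets.getD a []) &&
          !pyInter (cycle_sets.getD c []) (cycle_sets.getD b []))))
  then 3
  else if (List.range nc).any (fun a =>
      (List.range' (a+1) (nc-(a+1))).any (fun b =>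
        !pyInter (cycle_sets.getD a []) (cycle_sets.getD b [])))
  then 2
  else if nc > 0 then 1 else 0

-- ===== PORT B =====
-- neighbour list of i in the disjointness graph: [j for j in range(n) if j != i and not (cs[i] & cs[j])]
def nbrB (cycle_sets : List (List Int)) (n i : Nat) : List Nat :=
  (List.range n).filter (fun j =>
    j ≠ i && !pyInter (cycle_sets.getD i []) (cycle_sets.getD j []))

def max_matching_3cycles_alt (cycle_sets : List (List Int)) : Int :=
  let n := cycle_sets.length
  if n = 0 then 0
  else
    let nbr := (List.range n).map (fun i => nbrB cycle_sets n i)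
    let nbrset := nbr.map (fun x => PySem.Set.ofList x)
    if (List.range n).any (fun i => (nbr.getD i []).any (fun j =>
         decide (i < j) && (nbrset.getD i []).any (fun k => (nbrset.getD j []).contains k)))
    then 3
    else if (List.range n).any (fun i => !(nbr.getD i []).isEmpty)
    then 2
    else 1

-- ===== PRECONDITION & SPEC =====
def Spec_max_matching_3cycles (cycle_sets : List (List Int)) (out : Int) : Prop := out = max_matching_3cycles_alt cycle_sets
instance (cycle_sets : List (List Int)) (out : Int) : Decidable (Spec_max_matching_3cycles cycle_sets out) := by unfold Spec_max_matching_3cycles; infer_instance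

-- ===== CLAIM (what is proved, stated in full; the proofs are below) =====
def Claim_equal_max_matching_3cycles : Prop := ∀ (cycle_sets : List (List Int)), Dom_max_matching_3cycles cycle_sets → Spec_max_matching_3cycles cycle_sets (max_matching_3cycles cycle_sets)

-- ===== LEMMAS AND PROOFS =====

-- the shared-element test is symmetric
theorem pyInter_symm (x y : List Int) : pyInter x y = pyInter y x := by
  simp only [pyInter]
  rw [Bool.eq_iff_iff]
  simp only [List.any_eq_true, List.contains_iff_mem]
  exact ⟨fun ⟨e, h1, h2⟩ => ⟨e, h2, h1⟩, fun ⟨e, h1, h2⟩ => ⟨e, h2, h1⟩⟩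

theorem mem_nbrB (cycle_sets : List (List Int)) (n i j : Nat) :
    j ∈ nbrB cycle_sets n i ↔
      j < n ∧ j ≠ i ∧ pyInter (cycle_sets.getD i []) (cycle_sets.getD j []) = false := by
  simp [nbrB, List.mem_filter, List.mem_range]

theorem getD_map_range_nbr {α : Type} (n i : Nat) (hi : i < n) (f : Nat → α) (d : α) :
    ((List.range n).map f).getD i d = f i := by
  rw [List.getD_eq_getElem?_getD]
  simp [hi]

theorem max_matching_3cycles_eq_alt (cycle_sets : List (List Int)) :
    max_matching_3cycles cycle_sets = max_matching_3cycles_alt cycle_sets := by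
  simp only [max_matching_3cycles, max_matching_3cycles_alt]
  set cs := cycle_sets
  set n := cs.length with hn
  by_cases h0 : n = 0
  · simp [h0]
  · simp only [h0, if_false]
    have hgd : ∀ i, i < n → ((List.range n).map (fun i => nbrB cs n i)).getD i [] = nbrB cs n i := by
      intro i hi; exact getD_map_range_nbr n i hi _ _
    have hgds : ∀ i, i < n →
        (((List.range n).map (fun i => nbrB cs n i)).map (fun x => PySem.Set.ofList x)).getD i [] =
          PySem.Set.ofList (nbrB cs n i) := by
      intro i hi
      rw [List.map_map]
      exact getD_map_range_nbr n i hi _ _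
    -- abbreviate the disjointness relation
    have htri :
        ((List.range n).any (fun a =>
          (List.range' (a+1) (n-(a+1))).any (fun b =>
            !pyInter (cs.getD a []) (cs.getD b []) &&
            (List.range' (b+1) (n-(b+1))).any (fun c =>
              !pyInter (cs.getD c []) (cs.getD a []) &&
              !pyInter (cs.getD c []) (cs.getD b []))))) =
        ((List.range n).any (fun i =>
          (((List.range n).map (fun i => nbrB cs n i)).getD i []).any (fun j =>
            decide (i < j) &&
            ((((List.range n).map (fun i => nbrB cs n i)).map (fun x => PySem.Set.ofList x)).getD i []).any
              (fun k =>
                ((((List.range n).map (fun i => nbrB cs n i)).map (fun x => PySem.Set.ofList x)).getD j []).contains k)))) := by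
      rw [Bool.eq_iff_iff]
      simp only [List.any_eq_true, List.mem_range, List.mem_range'_1, Bool.and_eq_true,
        Bool.not_eq_eq_eq_not, Bool.not_true, decide_eq_true_eq]
      constructor
      · rintro ⟨a, ha, b, ⟨hab, hbn⟩, hDab, c, ⟨hbc, hcn⟩, hDca, hDcb⟩
        have hbn' : b < n := by omega
        refine ⟨a, by omega, ?_⟩
        rw [hgd a (by omega)]
        refine ⟨b, (mem_nbrB cs n a b).2 ⟨hbn', by omega, hDab⟩, by omega, ?_⟩
        rw [hgds a (by omega), hgds b hbn']
        refine ⟨c, ?_, ?_⟩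
        · rw [PySem.Set.mem_ofList, mem_nbrB]
          exact ⟨by omega, by omega, by rw [pyInter_symm]; exact hDca⟩
        · simp only [PySem.Set.contains, List.contains_iff_mem, PySem.Set.mem_ofList, mem_nbrB]
          exact ⟨by omega, by omega, by rw [pyInter_symm]; exact hDcb⟩
      · rintro ⟨i, hi, hrest⟩
        rw [hgd i hi] at hrest
        obtain ⟨j, hjmem, hij, k, hki, hkj⟩ := hrest
        rw [hgds i hi] at hki
        obtain ⟨hjn, hji, hDij⟩ := (mem_nbrB cs n i j).1 hjmem
        rw [hgds j hjn] at hkj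
        rw [PySem.Set.mem_ofList, mem_nbrB] at hki
        simp only [PySem.Set.contains, List.contains_iff_mem, PySem.Set.mem_ofList, mem_nbrB] at hkj
        obtain ⟨hkn, hkinej, hDik⟩ := hki
        obtain ⟨_, hkjne, hDjk⟩ := hkj
        -- sort {i, j, k}: i < j, k ≠ i, k ≠ j
        rcases Nat.lt_trichotomy k i with hki' | hki' | hki'
        · exact ⟨k, by omega, i, ⟨by omega, by omega⟩, by rw [pyInter_symm]; exact hDik,
            j, ⟨by omega, by omega⟩, hDjk,
            by rw [pyInter_symm]; exact hDij⟩
        · omega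
        · rcases Nat.lt_trichotomy k j with hkj' | hkj' | hkj'
          · exact ⟨i, by omega, k, ⟨by omega, by omega⟩, hDik,
              j, ⟨by omega, by omega⟩, by rw [pyInter_symm]; exact hDij, hDjk⟩
          · omega
          · exact ⟨i, by omega, j, ⟨by omega, by omega⟩, hDij,
              k, ⟨by omega, by omega⟩, by rw [pyInter_symm]; exact hDik,
              by rw [pyInter_symm]; exact hDjk⟩
    have hpair :
        ((List.range n).any (fun a =>
          (List.range' (a+1) (n-(a+1))).any (fun b =>
            !pyInter (cs.getD a []) (cs.getD b [])))) =
        ((List.range n).any (fun i =>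
          !(((List.range n).map (fun i => nbrB cs n i)).getD i []).isEmpty)) := by
      rw [Bool.eq_iff_iff]
      simp only [List.any_eq_true, List.mem_range, List.mem_range'_1,
        Bool.not_eq_eq_eq_not, Bool.not_true]
      constructor
      · rintro ⟨a, ha, b, ⟨hab, hbn⟩, hDab⟩
        refine ⟨a, by omega, ?_⟩
        rw [hgd a (by omega), List.isEmpty_eq_false_iff_exists_mem]
        exact ⟨b, (mem_nbrB cs n a b).2 ⟨by omega, by omega, hDab⟩⟩
      · rintro ⟨i, hi, hne⟩
        rw [hgd i hi, List.isEmpty_eq_false_iff_exists_mem] at hne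
        obtain ⟨j, hj⟩ := hne
        obtain ⟨hjn, hji, hDij⟩ := (mem_nbrB cs n i j).1 hj
        rcases Nat.lt_or_ge i j with hij | hij
        · exact ⟨i, by omega, j, ⟨by omega, by omega⟩, hDij⟩
        · exact ⟨j, by omega, i, ⟨by omega, by omega⟩, by rw [pyInter_symm]; exact hDij⟩
    rw [htri, hpair]
    have : n > 0 := Nat.pos_of_ne_zero h0
    simp [this]

-- ===== VERDICT (by name: the statement is the Claim_ definition above) =====
theorem max_matching_3cycles_spec : Claim_equal_max_matching_3cycles := by
  intro cycle_sets _
  unfold Spec_max_matching_3cycles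
  exact max_matching_3cycles_eq_alt cycle_sets
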